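-- pv_equiv track=rewrite | github.com/jaewoogwak/sit-v2 | scripts/plot_boundary_stats.py | _bounds_from_peaks
-- ===== SOURCE A (Python) =====
-- def _bounds_from_peaks(peaks, num_frames):
--     clean_peaks = sorted({int(p) for p in peaks if p is not None})
--     if num_frames is None:
--         num_frames = (max(clean_peaks) + 1) if clean_peaks else 1
--     if num_frames <= 0:
--         return [(0, 0)]
--     if not clean_peaks:
--         return [(0, num_frames)]
--     bounds = []
--     start = 0
--     for peak in clean_peaks:
--         end = peak + 1
--         if end <= start:
--             continue
--         bounds.append((start, end))
--         start = end
--     if start < num_frames: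
--         bounds.append((start, num_frames))
--     return bounds or [(0, num_frames)]
-- ===== SOURCE B (Python) =====
-- def _bounds_from_peaks(peaks, num_frames):
--     distinct = {int(p) for p in peaks if p is not None}
--     if num_frames is None:
--         num_frames = max(distinct) + 1 if distinct else 1
--     if num_frames <= 0:
--         return [(0, 0)]
--     if not distinct:
--         return [(0, num_frames)]
--
--     def build(desc):
--         # desc: the relevant (non-negative) peaks in DESCENDING order.
--         # Assembles the interval list back-to-front by recursion: the first
--         # peak yields the last interval, whose start is the next peak + 1
--         # (or 0 when it is the only one left).
--         if not desc:
--             return []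
--         start = desc[1] + 1 if len(desc) > 1 else 0
--         return build(desc[1:]) + [(start, desc[0] + 1)]
--
--     desc = sorted((p for p in distinct if p >= 0), reverse=True)
--     if desc and desc[0] + 1 >= num_frames:
--         tail = []
--     else:
--         tail = [((desc[0] + 1) if desc else 0, num_frames)]
--     return build(desc) + tail
-- ===== Notes on version B (the rewrite author's own statement) =====
-- stated objective: alternative
-- what changed: Replaces A's stateful forward loop (running start, in-loop skip of non-positive ends) by a recursion over the non-negative distinct peaks sorted in DESCENDING order that assembles the interval list back-to-front, each interval's start taken from the neighbouring peak instead of accumulated state, with the tail interval decided directly from the maximum peak.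
import Mathlib
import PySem

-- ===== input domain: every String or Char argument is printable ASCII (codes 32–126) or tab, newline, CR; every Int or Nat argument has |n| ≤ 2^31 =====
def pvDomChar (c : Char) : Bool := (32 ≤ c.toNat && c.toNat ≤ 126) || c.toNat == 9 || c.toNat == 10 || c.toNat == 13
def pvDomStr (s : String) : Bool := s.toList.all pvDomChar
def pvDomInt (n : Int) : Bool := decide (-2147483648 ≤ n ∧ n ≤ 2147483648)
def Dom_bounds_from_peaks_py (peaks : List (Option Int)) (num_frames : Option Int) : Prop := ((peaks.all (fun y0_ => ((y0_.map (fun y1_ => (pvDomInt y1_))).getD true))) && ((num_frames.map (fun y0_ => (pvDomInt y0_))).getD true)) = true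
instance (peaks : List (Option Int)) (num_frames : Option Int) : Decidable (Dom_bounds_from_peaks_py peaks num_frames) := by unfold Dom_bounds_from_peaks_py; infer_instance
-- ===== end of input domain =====

-- B recurses over the non-negative distinct peaks sorted in DESCENDING order, assembling the
-- interval list back-to-front with each start taken from the neighbouring peak, instead of A's
-- forward loop with a running start; same cost, different decomposition.

-- ===== PORT A =====
def bounds_from_peaks_py (peaks : List (Option Int)) (num_frames : Option Int) : List (Int × Int) :=
  let clean_peaks := PySem.List.sorted (PySem.Set.ofList (peaks.filterMap id)) (fun x => x) false
  let nf : Int :=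
    match num_frames with
    | some n => n
    | none => match PySem.List.max? clean_peaks (fun x => x) with
              | some m => m + 1
              | none => 1
  if nf ≤ 0 then [((0 : Int), (0 : Int))]
  else if clean_peaks = [] then [((0 : Int), nf)]
  else
    let st := clean_peaks.foldl
      (fun (s : List (Int × Int) × Int) (peak : Int) =>
        if peak + 1 ≤ s.2 then s else (s.1 ++ [(s.2, peak + 1)], peak + 1)) ([], 0)
    let bounds := if st.2 < nf then st.1 ++ [(st.2, nf)] else st.1
    if bounds = [] then [((0 : Int), nf)] else bounds

-- ===== PORT B =====
-- Source B's inner `build(desc)`: recursion on the descending peak list, output built back-to-front.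
def pvBuild : List Int → List (Int × Int)
  | [] => []
  | p :: rest =>
    let start : Int := match rest with | q :: _ => q + 1 | [] => 0
    pvBuild rest ++ [(start, p + 1)]

def bounds_from_peaks_py_alt (peaks : List (Option Int)) (num_frames : Option Int) : List (Int × Int) :=
  let distinct := PySem.Set.ofList (peaks.filterMap id)
  let nf : Int :=
    match num_frames with
    | some n => n
    | none => match PySem.List.max? distinct (fun x => x) with
              | some m => m + 1
              | none => 1
  if nf ≤ 0 then [((0 : Int), (0 : Int))]
  else if distinct = [] then [((0 : Int), nf)]
  else
    let desc := PySem.List.sorted (distinct.filter (fun p => 0 ≤ p)) (fun x => x) true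
    let tail : List (Int × Int) :=
      match desc with
      | p :: _ => if nf ≤ p + 1 then [] else [(p + 1, nf)]
      | [] => [((0 : Int), nf)]
    pvBuild desc ++ tail

-- ===== PRECONDITION & SPEC =====
def Spec_bounds_from_peaks_py (peaks : List (Option Int)) (num_frames : Option Int) (out : List (Int × Int)) : Prop := out = bounds_from_peaks_py_alt peaks num_frames
instance (peaks : List (Option Int)) (num_frames : Option Int) (out : List (Int × Int)) : Decidable (Spec_bounds_from_peaks_py peaks num_frames out) := by unfold Spec_bounds_from_peaks_py; infer_instance

-- ===== CLAIM (what is proved, stated in full; the proofs are below) =====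
def Claim_equal_bounds_from_peaks_py : Prop := ∀ (peaks : List (Option Int)) (num_frames : Option Int), Dom_bounds_from_peaks_py peaks num_frames → Spec_bounds_from_peaks_py peaks num_frames (bounds_from_peaks_py peaks num_frames)

-- ===== LEMMAS AND PROOFS =====

-- A's loop body (definitionally the lambda in the port of A)
def pvStep (s : List (Int × Int) × Int) (peak : Int) : List (Int × Int) × Int :=
  if peak + 1 ≤ s.2 then s else (s.1 ++ [(s.2, peak + 1)], peak + 1)

-- Starting from state (acc, 0) on a strictly increasing list, the skipped peaks are exactly the negative ones.
theorem pvSkipNeg (l : List Int) (acc : List (Int × Int))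
    (h : l.Pairwise (· < ·)) :
    l.foldl pvStep (acc, 0) = (l.filter (fun p => 0 ≤ p)).foldl pvStep (acc, 0) := by
  induction l with
  | nil => rfl
  | cons p t ih =>
    rcases List.pairwise_cons.mp h with ⟨hp, ht⟩
    by_cases h0 : 0 ≤ p
    · have hfilter : t.filter (fun p => 0 ≤ p) = t := by
        apply List.filter_eq_self.mpr
        intro x hx
        have := hp x hx
        simp only [decide_eq_true_eq]
        omega
      simp only [List.filter_cons, h0, decide_true, if_true, List.foldl_cons, hfilter]
    · have hstep : pvStep (acc, 0) p = (acc, 0) := by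
        simp only [pvStep]
        have : p + 1 ≤ 0 := by omega
        simp [this]
      simp only [List.filter_cons, decide_eq_true_eq, h0, if_false, List.foldl_cons, hstep,
        ih ht]

-- Loop characterisation on a strictly increasing list whose elements are ≥ the start.
theorem pvLoopZip (l : List Int) (s : Int) (acc : List (Int × Int))
    (hge : ∀ p ∈ l, s ≤ p) (h : l.Pairwise (· < ·)) :
    l.foldl pvStep (acc, s) =
      (acc ++ (s :: l.map (fun p => p + 1)).zip (l.map (fun p => p + 1)),
       ((s :: l.map (fun p => p + 1)).getLast?).getD 0) := by
  induction l generalizing s acc with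
  | nil => simp
  | cons p t ih =>
    rcases List.pairwise_cons.mp h with ⟨hp, ht⟩
    have hs : s ≤ p := hge p (List.mem_cons_self ..)
    have hstep : pvStep (acc, s) p = (acc ++ [(s, p + 1)], p + 1) := by
      simp only [pvStep]
      have : ¬ (p + 1 ≤ s) := by omega
      simp [this]
    have hge' : ∀ q ∈ t, p + 1 ≤ q := fun q hq => by have := hp q hq; omega
    have := ih (p + 1) (acc ++ [(s, p + 1)]) hge' ht
    simp only [List.foldl_cons, hstep, this, Prod.mk.injEq]
    constructor
    · simp [List.zip]
    · simp [List.getLast?_cons_cons]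

-- zip-chain of a snoc list: appending one breakpoint appends one interval.
theorem pvZipSnoc (m : List Int) (s p : Int) :
    (s :: (m ++ [p])).zip (m ++ [p]) =
      (s :: m).zip m ++ [(((s :: m).getLast?).getD 0, p)] := by
  induction m generalizing s with
  | nil => simp [List.zip]
  | cons x m' ih =>
    simp only [List.cons_append, List.zip_cons_cons, ih x, List.getLast?_cons_cons]

-- the running start at the end of the ascending list, as Source B reads it off the descending head
theorem pvLastAux (l : List Int) :
    (((0 : Int) :: l.map (fun p => p + 1)).getLast?).getD 0 =
      (match l.reverse with | q :: _ => q + 1 | [] => (0 : Int)) := by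
  induction l using List.reverseRecOn with
  | nil => simp
  | append_singleton t q _ =>
    simp only [List.map_append, List.map_cons, List.map_nil, List.reverse_append,
      List.reverse_cons, List.reverse_nil, List.nil_append, List.singleton_append]
    have hassoc : ((0 : Int) :: (t.map (fun p => p + 1) ++ [q + 1])) =
        ((0 : Int) :: t.map (fun p => p + 1)) ++ [q + 1] := by simp
    rw [hassoc, List.getLast?_concat]
    rfl

-- Source B's recursion on the descending list produces exactly the zip-chain of the ascending list.
theorem pvBuildZip (l : List Int) :
    pvBuild l.reverse = ((0 : Int) :: l.map (fun p => p + 1)).zip (l.map (fun p => p + 1)) := by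
  induction l using List.reverseRecOn with
  | nil => rfl
  | append_singleton t p ih =>
    rw [List.reverse_append]
    simp only [List.reverse_cons, List.reverse_nil, List.nil_append, List.singleton_append]
    show pvBuild (p :: t.reverse) = _
    have hunf : pvBuild (p :: t.reverse) =
        pvBuild t.reverse ++ [((match t.reverse with | q :: _ => q + 1 | [] => (0 : Int)), p + 1)] := rfl
    rw [hunf, ih]
    simp only [List.map_append, List.map_cons, List.map_nil]
    rw [pvZipSnoc]
    congr 2
    rw [pvLastAux t]

-- max(xs) is invariant under permutation (Int elements, identity key)
theorem pvMaxPerm (l₁ l₂ : List Int) (hperm : l₁.Perm l₂) :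
    PySem.List.max? l₁ (fun x => x) = PySem.List.max? l₂ (fun x => x) := by
  cases hm₁ : PySem.List.max? l₁ (fun x => x) with
  | none =>
    have h1 : l₁ = [] := (PySem.List.max?_eq_none_iff _ _).mp hm₁
    subst h1
    rw [(PySem.List.max?_eq_none_iff _ _).mpr hperm.symm.eq_nil]
  | some m =>
    cases hm₂ : PySem.List.max? l₂ (fun x => x) with
    | none =>
      have h2 : l₂ = [] := (PySem.List.max?_eq_none_iff _ _).mp hm₂
      subst h2
      rw [hperm.eq_nil, (PySem.List.max?_eq_none_iff _ _).mpr rfl] at hm₁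
      simp at hm₁
    | some m' =>
      have hmem₁ := PySem.List.max?_mem hm₁
      have hmem₂ := PySem.List.max?_mem hm₂
      have h1 := PySem.List.max?_isMax hm₁ m' (hperm.mem_iff.mpr hmem₂)
      have h2 := PySem.List.max?_isMax hm₂ m (hperm.mem_iff.mp hmem₁)
      simp only at h1 h2
      exact congrArg some (le_antisymm h2 h1)

-- B's descending sort of the filtered set is the reverse of (A's sorted list filtered).
theorem pvDescEq (xs : List Int) :
    PySem.List.sorted ((PySem.Set.ofList xs).filter (fun p => 0 ≤ p)) (fun x => x) true =
      ((PySem.List.sorted (PySem.Set.ofList xs) (fun x => x) false).filter (fun p => 0 ≤ p)).reverse := by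
  apply PySem.List.sorted_rev_eq_of_perm_of_pairwise_gt
  · exact (List.reverse_perm _).trans ((PySem.List.sorted_perm _ _ _).filter _)
  · rw [List.pairwise_reverse]
    exact (PySem.List.sorted_ofList_pairwise_lt xs).filter _

-- core equality of the two else-branches (nf > 0, distinct set nonempty)
theorem pvCore (xs : List Int) (nf : Int) :
    (let st := (PySem.List.sorted (PySem.Set.ofList xs) (fun x => x) false).foldl pvStep ([], 0);
     let bounds := if st.2 < nf then st.1 ++ [(st.2, nf)] else st.1;
     if bounds = [] then [((0 : Int), nf)] else bounds)
    =
    (let desc := PySem.List.sorted ((PySem.Set.ofList xs).filter (fun p => 0 ≤ p)) (fun x => x) true;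
     let tail : List (Int × Int) :=
       match desc with
       | p :: _ => if nf ≤ p + 1 then [] else [(p + 1, nf)]
       | [] => [((0 : Int), nf)];
     pvBuild desc ++ tail) := by
  have hpair : (PySem.List.sorted (PySem.Set.ofList xs) (fun x => x) false).Pairwise (· < ·) :=
    PySem.List.sorted_ofList_pairwise_lt xs
  set cl := PySem.List.sorted (PySem.Set.ofList xs) (fun x => x) false with hcl
  set fil := cl.filter (fun p => 0 ≤ p) with hfil
  have hpairf : fil.Pairwise (· < ·) := hpair.filter _
  have hgef : ∀ p ∈ fil, (0 : Int) ≤ p := by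
    intro p hp
    have := List.of_mem_filter hp
    simpa using this
  have h1 : cl.foldl pvStep ([], 0) = fil.foldl pvStep ([], 0) := pvSkipNeg cl [] hpair
  have h2 := pvLoopZip fil 0 [] hgef hpairf
  have hdesc : PySem.List.sorted ((PySem.Set.ofList xs).filter (fun p => 0 ≤ p)) (fun x => x) true
      = fil.reverse := pvDescEq xs
  simp only [hdesc, h1, h2, List.nil_append]
  rw [pvBuildZip fil, pvLastAux fil]
  cases hrev : fil.reverse with
  | nil =>
    have hfe : fil = [] := by simpa using congrArg List.reverse hrev
    simp [hfe]
  | cons q r =>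
    have hfe : fil ≠ [] := by
      intro h; rw [h] at hrev; simp at hrev
    have hzne : (((0 : Int) :: fil.map (fun p => p + 1)).zip (fil.map (fun p => p + 1))) ≠ [] := by
      cases hf : fil with
      | nil => exact absurd hf hfe
      | cons a t => simp [List.zip]
    by_cases hc : q + 1 < nf
    · have : ¬ nf ≤ q + 1 := by omega
      simp only [hc, if_true, this, if_false]
      simp
    · have : nf ≤ q + 1 := by omega
      simp only [hc, if_false, this, if_true, List.append_nil]
      simp [hzne]

-- both whole bodies agree given the same nf value
theorem pvTail (xs : List Int) (nf : Int) :
    (if nf ≤ 0 then [((0 : Int), (0 : Int))]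
     else if PySem.List.sorted (PySem.Set.ofList xs) (fun x => x) false = [] then [((0 : Int), nf)]
     else
       (let st := (PySem.List.sorted (PySem.Set.ofList xs) (fun x => x) false).foldl pvStep ([], 0);
        let bounds := if st.2 < nf then st.1 ++ [(st.2, nf)] else st.1;
        if bounds = [] then [((0 : Int), nf)] else bounds))
    =
    (if nf ≤ 0 then [((0 : Int), (0 : Int))]
     else if PySem.Set.ofList xs = [] then [((0 : Int), nf)]
     else
       (let desc := PySem.List.sorted ((PySem.Set.ofList xs).filter (fun p => 0 ≤ p)) (fun x => x) true;
        let tail : List (Int × Int) :=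
          match desc with
          | p :: _ => if nf ≤ p + 1 then [] else [(p + 1, nf)]
          | [] => [((0 : Int), nf)];
        pvBuild desc ++ tail)) := by
  by_cases h0 : nf ≤ 0
  · simp only [if_pos h0]
  · simp only [if_neg h0]
    by_cases he : PySem.Set.ofList xs = ([] : List Int)
    · have hs : PySem.List.sorted (PySem.Set.ofList xs) (fun x => x) false = [] := by
        rw [he]; rfl
      simp only [if_pos he, if_pos hs]
    · have hs : ¬ (PySem.List.sorted (PySem.Set.ofList xs) (fun x => x) false = []) := by
        intro h
        exact he ((PySem.List.sorted_eq_nil_iff _ _ _).mp h)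
      simp only [if_neg he, if_neg hs]
      exact pvCore xs nf

-- ===== VERDICT (by name: the statement is the Claim_ definition above) =====
theorem bounds_from_peaks_py_spec : Claim_equal_bounds_from_peaks_py := by
  intro peaks num_frames _
  show bounds_from_peaks_py peaks num_frames = bounds_from_peaks_py_alt peaks num_frames
  unfold bounds_from_peaks_py bounds_from_peaks_py_alt
  cases num_frames with
  | some n => exact pvTail (peaks.filterMap id) n
  | none =>
    have hmax := pvMaxPerm _ _ (PySem.List.sorted_perm (PySem.Set.ofList (peaks.filterMap id)) (fun x => x) false)
    simp only [hmax]
    exact pvTail (peaks.filterMap id) _
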